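-- pv_equiv track=rewrite | github.com/sexyUnderwriter/Documents | 12tone.py | analyze_hexachordal_combinatoriality
-- ===== SOURCE A (Python) =====
-- def analyze_hexachordal_combinatoriality(row):
--     """Analyze basic hexachordal combinatoriality for the first hexachord.
--
--     For H = set(row[:6]), count how many transpositions/inversions produce a disjoint
--     hexachord (i.e., H ∩ transform(H) == ∅). Since |H|=6, disjoint implies the union is
--     the full aggregate.
--     """
--     if len(row) != 12:
--         return {
--             "comb_t_count": 0,
--             "comb_t_first_n": None,
--             "comb_i_count": 0,
--             "comb_i_first_n": None,
--         }
--
--     h = {int(x) % 12 for x in row[:6]}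
--     if len(h) != 6:
--         # Not a proper hexachord (row not a permutation or has duplicates)
--         return {
--             "comb_t_count": 0,
--             "comb_t_first_n": None,
--             "comb_i_count": 0,
--             "comb_i_first_n": None,
--         }
--
--     t_ns = []
--     i_ns = []
--
--     for n in range(12):
--         tset = {(x + n) % 12 for x in h}
--         if h.isdisjoint(tset):
--             t_ns.append(n)
--
--         iset = {(-x + n) % 12 for x in h}
--         if h.isdisjoint(iset):
--             i_ns.append(n)
--
--     return {
--         "comb_t_count": int(len(t_ns)),
--         "comb_t_first_n": (t_ns[0] if t_ns else None),
--         "comb_i_count": int(len(i_ns)),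
--         "comb_i_first_n": (i_ns[0] if i_ns else None),
--     }
-- ===== SOURCE B (Python) =====
-- def analyze_hexachordal_combinatoriality(row):
--     empty = {
--         "comb_t_count": 0,
--         "comb_t_first_n": None,
--         "comb_i_count": 0,
--         "comb_i_first_n": None,
--     }
--     if len(row) != 12:
--         return empty
--     h = {int(x) % 12 for x in row[:6]}
--     if len(h) != 6:
--         return empty
--     # n is a transposition hit iff n is NOT a pairwise difference of h;
--     # n is an inversion hit iff n is NOT a pairwise sum of h.
--     diffs = {(a - x) % 12 for a in h for x in h}
--     sums = {(a + x) % 12 for a in h for x in h}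
--     t_ns = [n for n in range(12) if n not in diffs]
--     i_ns = [n for n in range(12) if n not in sums]
--     return {
--         "comb_t_count": len(t_ns),
--         "comb_t_first_n": (t_ns[0] if t_ns else None),
--         "comb_i_count": len(i_ns),
--         "comb_i_first_n": (i_ns[0] if i_ns else None),
--     }
-- ===== Notes on version B (the rewrite author's own statement) =====
-- stated objective: simpler
-- what changed: Instead of A's loop over all 12 n that builds and tests a transposed/inverted hexachord set per n, B precomputes the pairwise difference set and pairwise sum set of the hexachord once and reads the answers off as the n in range(12) missing from them.
import Mathlib
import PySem

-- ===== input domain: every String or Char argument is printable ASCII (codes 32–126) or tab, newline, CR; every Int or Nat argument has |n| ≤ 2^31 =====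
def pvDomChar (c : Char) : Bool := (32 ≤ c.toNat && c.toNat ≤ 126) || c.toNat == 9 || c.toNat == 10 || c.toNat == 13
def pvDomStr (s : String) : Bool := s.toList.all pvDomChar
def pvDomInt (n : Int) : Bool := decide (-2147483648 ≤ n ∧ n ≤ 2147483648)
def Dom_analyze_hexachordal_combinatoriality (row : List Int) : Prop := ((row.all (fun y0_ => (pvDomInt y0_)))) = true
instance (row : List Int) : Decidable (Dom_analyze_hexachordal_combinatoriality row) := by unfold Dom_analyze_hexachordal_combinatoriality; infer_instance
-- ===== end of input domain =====

-- B replaces A's 12-iteration loop of building and testing transformed hexachords by two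
-- precomputed pairwise difference/sum sets: simpler (no repeated set construction per n).

-- the "no combinatoriality" dict both programs return on bad input
def pvEmptyResult : List (String × Option Int) :=
  [("comb_t_count", some 0), ("comb_t_first_n", none),
   ("comb_i_count", some 0), ("comb_i_first_n", none)]

-- ===== PORT A =====
def analyze_hexachordal_combinatoriality (row : List Int) : List (String × Option Int) :=
  if row.length ≠ 12 then pvEmptyResult
  else
    let h : PySem.Set Int :=
      PySem.Set.ofList ((PySem.List.slice row none (some 6)).map (fun x => PySem.Int.mod x 12))
    if h.length ≠ 6 then pvEmptyResult
    else
      let p := (PySem.List.pyRange 0 12 1).foldl (fun (st : List Int × List Int) n =>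
        let tset : PySem.Set Int :=
          PySem.Set.ofList (h.map (fun x => PySem.Int.mod (x + n) 12))
        let st1 := if PySem.Set.isdisjoint h tset then (st.1 ++ [n], st.2) else st
        let iset : PySem.Set Int :=
          PySem.Set.ofList (h.map (fun x => PySem.Int.mod (-x + n) 12))
        if PySem.Set.isdisjoint h iset then (st1.1, st1.2 ++ [n]) else st1) ([], [])
      [("comb_t_count", some (p.1.length : Int)), ("comb_t_first_n", p.1.head?),
       ("comb_i_count", some (p.2.length : Int)), ("comb_i_first_n", p.2.head?)]

-- ===== PORT B =====
def analyze_hexachordal_combinatoriality_alt (row : List Int) : List (String × Option Int) :=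
  if row.length ≠ 12 then pvEmptyResult
  else
    let h : PySem.Set Int :=
      PySem.Set.ofList ((PySem.List.slice row none (some 6)).map (fun x => PySem.Int.mod x 12))
    if h.length ≠ 6 then pvEmptyResult
    else
      let diffs : PySem.Set Int :=
        PySem.Set.ofList (h.flatMap (fun a => h.map (fun x => PySem.Int.mod (a - x) 12)))
      let sums : PySem.Set Int :=
        PySem.Set.ofList (h.flatMap (fun a => h.map (fun x => PySem.Int.mod (a + x) 12)))
      let t_ns := (PySem.List.pyRange 0 12 1).filter (fun n => !(PySem.Set.contains diffs n))
      let i_ns := (PySem.List.pyRange 0 12 1).filter (fun n => !(PySem.Set.contains sums n))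
      [("comb_t_count", some (t_ns.length : Int)), ("comb_t_first_n", t_ns.head?),
       ("comb_i_count", some (i_ns.length : Int)), ("comb_i_first_n", i_ns.head?)]

-- ===== PRECONDITION & SPEC =====
def Spec_analyze_hexachordal_combinatoriality (row : List Int) (out : List (String × Option Int)) : Prop := out = analyze_hexachordal_combinatoriality_alt row
instance (row : List Int) (out : List (String × Option Int)) : Decidable (Spec_analyze_hexachordal_combinatoriality row out) := by unfold Spec_analyze_hexachordal_combinatoriality; infer_instance

-- ===== CLAIM (what is proved, stated in full; the proofs are below) =====
def Claim_equal_analyze_hexachordal_combinatoriality : Prop := ∀ (row : List Int), Dom_analyze_hexachordal_combinatoriality row → Spec_analyze_hexachordal_combinatoriality row (analyze_hexachordal_combinatoriality row)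

-- ===== LEMMAS AND PROOFS =====

-- A's loop with two conditional appends is the pair of filters.
theorem pvFoldlPairFilter (p q : Int → Bool) (l : List Int) (acc : List Int × List Int) :
    l.foldl (fun st n =>
      let st1 := if p n then (st.1 ++ [n], st.2) else st
      if q n then (st1.1, st1.2 ++ [n]) else st1) acc
      = (acc.1 ++ l.filter p, acc.2 ++ l.filter q) := by
  induction l generalizing acc with
  | nil => simp
  | cons x xs ih =>
      simp only [List.foldl_cons, List.filter_cons, ih]
      cases hp : p x <;> cases hq : q x <;> simp

-- elements of the hexachord set are residues mod 12
theorem pvMemBounds (l : List Int) (a : Int)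
    (ha : a ∈ PySem.Set.ofList (l.map (fun x => PySem.Int.mod x 12))) : 0 ≤ a ∧ a < 12 := by
  rw [PySem.Set.mem_ofList, List.mem_map] at ha
  obtain ⟨y, -, rfl⟩ := ha
  exact ⟨PySem.Int.mod_nonneg y (by omega), PySem.Int.mod_lt y (by omega)⟩

-- transposition test: disjointness of h and h+n  ↔  n is not a pairwise difference
theorem pvTrans (h : PySem.Set Int) (hb : ∀ a ∈ h, 0 ≤ a ∧ a < 12) (n : Int)
    (hn : 0 ≤ n) (hn' : n < 12) :
    PySem.Set.isdisjoint h (PySem.Set.ofList (h.map (fun x => PySem.Int.mod (x + n) 12)))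
      = !(PySem.Set.contains (PySem.Set.ofList
            (h.flatMap (fun a => h.map (fun x => PySem.Int.mod (a - x) 12)))) n) := by
  have key : (¬ ∀ y ∈ h, y ∉ (PySem.Set.ofList (h.map (fun x => PySem.Int.mod (x + n) 12)))) ↔
      n ∈ PySem.Set.ofList (h.flatMap (fun a => h.map (fun x => PySem.Int.mod (a - x) 12))) := by
    simp only [PySem.Set.mem_ofList, List.mem_map, List.mem_flatMap, not_forall, not_not]
    constructor
    · rintro ⟨a, ha, x, hx, hxa⟩
      refine ⟨a, ha, x, hx, ?_⟩
      obtain ⟨h0, h1⟩ := hb a ha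
      rw [← hxa]
      simp only [PySem.Int.mod_eq_emod_of_pos (show (0:Int) < 12 by omega)]
      omega
    · rintro ⟨a, ha, x, hx, hax⟩
      refine ⟨a, ha, x, hx, ?_⟩
      obtain ⟨h0, h1⟩ := hb a ha
      simp only [PySem.Int.mod_eq_emod_of_pos (show (0:Int) < 12 by omega)] at hax ⊢
      omega
  cases hD : PySem.Set.contains (PySem.Set.ofList
      (h.flatMap (fun a => h.map (fun x => PySem.Int.mod (a - x) 12)))) n
  · rw [Bool.not_false]
    refine (PySem.Set.isdisjoint_iff _ _).2 ((not_iff_comm.1 key).1 ?_)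
    intro hm
    have hc := (PySem.Set.contains_iff _ _).2 hm
    rw [hD] at hc
    exact Bool.false_ne_true hc
  · rw [Bool.not_true, Bool.eq_false_iff]
    intro hdt
    exact key.2 ((PySem.Set.contains_iff _ _).1 hD) ((PySem.Set.isdisjoint_iff _ _).1 hdt)

-- inversion test: disjointness of h and n−h  ↔  n is not a pairwise sum
theorem pvInv (h : PySem.Set Int) (hb : ∀ a ∈ h, 0 ≤ a ∧ a < 12) (n : Int)
    (hn : 0 ≤ n) (hn' : n < 12) :
    PySem.Set.isdisjoint h (PySem.Set.ofList (h.map (fun x => PySem.Int.mod (-x + n) 12)))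
      = !(PySem.Set.contains (PySem.Set.ofList
            (h.flatMap (fun a => h.map (fun x => PySem.Int.mod (a + x) 12)))) n) := by
  have key : (¬ ∀ y ∈ h, y ∉ (PySem.Set.ofList (h.map (fun x => PySem.Int.mod (-x + n) 12)))) ↔
      n ∈ PySem.Set.ofList (h.flatMap (fun a => h.map (fun x => PySem.Int.mod (a + x) 12))) := by
    simp only [PySem.Set.mem_ofList, List.mem_map, List.mem_flatMap, not_forall, not_not]
    constructor
    · rintro ⟨a, ha, x, hx, hxa⟩
      refine ⟨a, ha, x, hx, ?_⟩
      obtain ⟨h0, h1⟩ := hb a ha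
      rw [← hxa]
      simp only [PySem.Int.mod_eq_emod_of_pos (show (0:Int) < 12 by omega)]
      omega
    · rintro ⟨a, ha, x, hx, hax⟩
      refine ⟨a, ha, x, hx, ?_⟩
      obtain ⟨h0, h1⟩ := hb a ha
      simp only [PySem.Int.mod_eq_emod_of_pos (show (0:Int) < 12 by omega)] at hax ⊢
      omega
  cases hD : PySem.Set.contains (PySem.Set.ofList
      (h.flatMap (fun a => h.map (fun x => PySem.Int.mod (a + x) 12)))) n
  · rw [Bool.not_false]
    refine (PySem.Set.isdisjoint_iff _ _).2 ((not_iff_comm.1 key).1 ?_)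
    intro hm
    have hc := (PySem.Set.contains_iff _ _).2 hm
    rw [hD] at hc
    exact Bool.false_ne_true hc
  · rw [Bool.not_true, Bool.eq_false_iff]
    intro hdt
    exact key.2 ((PySem.Set.contains_iff _ _).1 hD) ((PySem.Set.isdisjoint_iff _ _).1 hdt)

-- ===== VERDICT (by name: the statement is the Claim_ definition above) =====
theorem analyze_hexachordal_combinatoriality_spec : Claim_equal_analyze_hexachordal_combinatoriality := by
  intro row _
  unfold Spec_analyze_hexachordal_combinatoriality
  unfold analyze_hexachordal_combinatoriality analyze_hexachordal_combinatoriality_alt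
  by_cases h12 : row.length ≠ 12
  · simp [h12]
  simp only [h12, if_false]
  set h : PySem.Set Int :=
    PySem.Set.ofList ((PySem.List.slice row none (some 6)).map (fun x => PySem.Int.mod x 12)) with hh
  by_cases h6 : h.length ≠ 6
  · simp [h6]
  simp only [h6, if_false]
  have hb : ∀ a ∈ h, 0 ≤ a ∧ a < 12 := fun a ha => pvMemBounds _ a (hh ▸ ha)
  have hfold := pvFoldlPairFilter
    (fun n => PySem.Set.isdisjoint h (PySem.Set.ofList (h.map (fun x => PySem.Int.mod (x + n) 12))))
    (fun n => PySem.Set.isdisjoint h (PySem.Set.ofList (h.map (fun x => PySem.Int.mod (-x + n) 12))))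
    (PySem.List.pyRange 0 12 1) ([], [])
  simp only [List.nil_append] at hfold
  rw [hfold]
  have ht : (PySem.List.pyRange 0 12 1).filter
      (fun n => PySem.Set.isdisjoint h (PySem.Set.ofList (h.map (fun x => PySem.Int.mod (x + n) 12))))
      = (PySem.List.pyRange 0 12 1).filter (fun n => !(PySem.Set.contains (PySem.Set.ofList
            (h.flatMap (fun a => h.map (fun x => PySem.Int.mod (a - x) 12)))) n)) := by
    apply List.filter_congr
    intro n hn
    rw [PySem.List.mem_pyRange_one] at hn
    exact pvTrans h hb n hn.1 hn.2
  have hi : (PySem.List.pyRange 0 12 1).filter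
      (fun n => PySem.Set.isdisjoint h (PySem.Set.ofList (h.map (fun x => PySem.Int.mod (-x + n) 12))))
      = (PySem.List.pyRange 0 12 1).filter (fun n => !(PySem.Set.contains (PySem.Set.ofList
            (h.flatMap (fun a => h.map (fun x => PySem.Int.mod (a + x) 12)))) n)) := by
    apply List.filter_congr
    intro n hn
    rw [PySem.List.mem_pyRange_one] at hn
    exact pvInv h hb n hn.1 hn.2
  rw [ht, hi]
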